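-- pv_equiv track=rewrite | github.com/SiddheshP1996/GFG-POTD-Daily | 2024/10 GFG-POTD-Daily-October-2024/02 Rotate-And-Delete.py | rotateDelete
-- ===== SOURCE A (Python) =====
-- from collections import deque
--
-- def rotateDelete(arr):
--     # Code here
--     arr = deque(arr)
--     n = len(arr)
--
--     for k in range(1, (n // 2) + 1):
--         arr.appendleft(arr.pop())
--         index = len(arr) - k
--         del arr[index]
--
--     return arr[0]
-- ===== SOURCE B (Python) =====
-- def rotateDelete(arr):
--     n = len(arr)
--     if n == 1:
--         return arr[0]
--     t = n // 2 - 1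
--     return arr[n - 1 - (3 * t + 1) // 2]
-- ===== Notes on version B (the rewrite author's own statement) =====
-- stated objective: faster
-- what changed: Replaced the O(n^2) deque simulation (n/2 rotate-and-delete rounds) by a closed-form formula for the survivor's index, arr[n-1-(3*(n//2-1)+1)//2], derived from the invariant that the deque head after t rounds sits at position ceil(3t/2) of the reversed list.
import Mathlib
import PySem

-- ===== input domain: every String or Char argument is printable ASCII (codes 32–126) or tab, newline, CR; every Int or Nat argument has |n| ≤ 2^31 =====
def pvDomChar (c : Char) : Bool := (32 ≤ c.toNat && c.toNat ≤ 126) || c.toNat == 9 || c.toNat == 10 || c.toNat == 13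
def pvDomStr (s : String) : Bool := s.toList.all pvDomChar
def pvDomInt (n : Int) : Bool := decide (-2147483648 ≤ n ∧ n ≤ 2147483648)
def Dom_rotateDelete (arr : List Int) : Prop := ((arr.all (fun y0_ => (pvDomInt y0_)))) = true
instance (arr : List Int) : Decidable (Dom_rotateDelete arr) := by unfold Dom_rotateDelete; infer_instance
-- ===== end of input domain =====

-- B replaces A's O(n^2) rotate-and-delete simulation by a closed-form survivor index
-- (objective: faster). On empty input both Pythons raise IndexError (excluded by Pre_).

-- ===== PORT A =====
-- literal transliteration: the deque is a List; `arr.appendleft(arr.pop())` is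
-- `getLastD :: dropLast` (the default of getLastD is never read: the list is nonempty
-- whenever the loop body runs), `del arr[index]` is `eraseIdx index.toNat` (on every
-- admitted run 1 ≤ index < len, where this is exact), `arr[0]` is pyGet? (IndexError,
-- i.e. none, only for empty input, excluded by Pre_).
def rotateDelete (arr : List Int) : Int :=
  let n : Int := arr.length
  let final := (PySem.List.pyRange 1 (PySem.Int.floordiv n 2 + 1) 1).foldl
    (fun a k =>
      let a1 := a.getLastD 0 :: a.dropLast
      let index : Int := (a1.length : Int) - k
      a1.eraseIdx index.toNat) arr
  (PySem.List.pyGet? final 0).getD 0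

-- ===== PORT B =====
-- closed form: for n ≥ 2 the survivor is arr[n - 1 - (3*(n//2 - 1) + 1)//2]
def rotateDelete_alt (arr : List Int) : Int :=
  let n : Int := arr.length
  if n == 1 then (PySem.List.pyGet? arr 0).getD 0
  else
    let t : Int := PySem.Int.floordiv n 2 - 1
    (PySem.List.pyGet? arr (n - 1 - PySem.Int.floordiv (3*t+1) 2)).getD 0

-- ===== PRECONDITION & SPEC =====
-- Pre_ excludes only the empty list, on which the Python A raises IndexError (arr[0]).
def Pre_rotateDelete (arr : List Int) : Prop := arr ≠ []
instance (arr : List Int) : Decidable (Pre_rotateDelete arr) := by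
  unfold Pre_rotateDelete; infer_instance
def pvWitness_rotateDelete : List Int := [3, 1, 4, 1, 5]

def Spec_rotateDelete (arr : List Int) (out : Int) : Prop := out = rotateDelete_alt arr
instance (arr : List Int) (out : Int) : Decidable (Spec_rotateDelete arr out) := by
  unfold Spec_rotateDelete; infer_instance

-- ===== CLAIM (what is proved, stated in full; the proofs are below) =====
def Claim_equal_rotateDelete : Prop := ∀ (arr : List Int), Dom_rotateDelete arr →
  Pre_rotateDelete arr → Spec_rotateDelete arr (rotateDelete arr)

-- ===== LEMMAS AND PROOFS =====

def pvP (t : Nat) : Nat := (3*t+1)/2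
def pvStepR (r : List Int) (k : Nat) : List Int := (r.drop 1).eraseIdx (k-1) ++ r.take 1
def pvAheadA (n t : Nat) : List Nat :=
  (List.range' t (t-1)).map pvP ++ List.range' (3*t-1) (n-(3*t-1))
def pvAheadB (n t0 t : Nat) : List Nat := (List.range' t (n - t - t0)).map pvP
def pvInv (f : Nat → Int) (ahead : List Nat) (t n : Nat) (r : List Int) : Prop :=
  ∃ C : List Int, r = ahead.map f ++ C ∧ r.length = n - t ∧
    (1 ≤ t → C.getLast? = some (f (pvP (t-1))))

theorem pvStep0 (f : Nat → Int) (n : Nat) (hn : 2 ≤ n) (r : List Int)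
    (h : pvInv f (pvAheadA n 0) 0 n r) :
    pvInv f (pvAheadA n 1) 1 n (pvStepR r 1) := by
  obtain ⟨C, hr, hlen, -⟩ := h
  obtain ⟨m, rfl⟩ : ∃ m, n = m + 2 := ⟨n - 2, by omega⟩
  have hA0 : pvAheadA (m+2) 0 = List.range' 0 (m+2) := by
    simp [pvAheadA]
  have hsplit : List.range' 0 (m+2) = 0 :: 1 :: List.range' 2 m := by
    rw [List.range'_succ, List.range'_succ]
  have hC : C = [] := by
    have hl := congrArg List.length hr
    simp [hA0] at hl
    rw [hlen] at hl
    have : C.length = 0 := by omega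
    exact List.eq_nil_of_length_eq_zero this
  subst hC
  rw [hA0, hsplit] at hr
  refine ⟨[f 0], ?_, ?_, ?_⟩
  · rw [hr]
    show (((f 0 :: f 1 :: List.map f (List.range' 2 m)) ++ []).drop 1).eraseIdx 0
        ++ ((f 0 :: f 1 :: List.map f (List.range' 2 m)) ++ []).take 1 = _
    simp [pvAheadA]
  · rw [hr] at hlen ⊢
    simp [pvStepR] at hlen ⊢
  · intro _
    simp [pvP]

theorem pvStep1 (f : Nat → Int) (n : Nat) (hn : 5 ≤ n) (r : List Int)
    (h : pvInv f (pvAheadA n 1) 1 n r) :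
    pvInv f (pvAheadA n 2) 2 n (pvStepR r 2) := by
  obtain ⟨C, hr, hlen, hC⟩ := h
  obtain ⟨m, rfl⟩ : ∃ m, n = m + 5 := ⟨n - 5, by omega⟩
  have hA1 : pvAheadA (m+5) 1 = 2 :: 3 :: 4 :: List.range' 5 m := by
    simp [pvAheadA]
    rw [List.range'_succ, List.range'_succ, List.range'_succ]
  rw [hA1] at hr
  refine ⟨C ++ [f 2], ?_, ?_, ?_⟩
  · rw [hr]
    show ((((f 2 :: f 3 :: f 4 :: List.map f (List.range' 5 m)) ++ C).drop 1).eraseIdx 1)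
        ++ ((f 2 :: f 3 :: f 4 :: List.map f (List.range' 5 m)) ++ C).take 1 = _
    have hA2 : pvAheadA (m+5) 2 = 3 :: List.range' 5 m := by
      simp [pvAheadA, List.range'_succ, pvP]
    rw [hA2]
    simp
  · rw [hr] at hlen
    simp at hlen
    rw [hr]
    simp [pvStepR]
    omega
  · intro _
    simp [pvP]

theorem pvRange3 (a l : Nat) :
    List.range' a (l+3) = a :: (a+1) :: (a+2) :: List.range' (a+3) l := by
  rw [List.range'_succ, List.range'_succ, List.range'_succ]

theorem pvStepA (f : Nat → Int) (n t : Nat) (ht : 2 ≤ t) (hA : 3*t+2 ≤ n) (r : List Int)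
    (h : pvInv f (pvAheadA n t) t n r) :
    pvInv f (pvAheadA n (t+1)) (t+1) n (pvStepR r (t+1)) := by
  obtain ⟨C, hr, hlen, -⟩ := h
  have hsplitF : List.range' t (t-1) = t :: List.range' (t+1) (t-2) := by
    rw [show t - 1 = (t-2) + 1 by omega, List.range'_succ]
  have hsplitP : List.range' (3*t-1) (n-(3*t-1)) =
      (3*t-1) :: (3*t) :: (3*t+1) :: List.range' (3*t+2) (n-3*t-2) := by
    rw [show n - (3*t-1) = (n-3*t-2) + 3 by omega, pvRange3,
        show 3*t-1+1 = 3*t by omega, show 3*t-1+2 = 3*t+1 by omega,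
        show 3*t-1+3 = 3*t+2 by omega]
  have hr' : r = f (pvP t) :: (((List.range' (t+1) (t-2)).map pvP).map f
      ++ [f (3*t-1), f (3*t)] ++ (f (3*t+1) :: ((List.range' (3*t+2) (n-3*t-2)).map f ++ C))) := by
    rw [hr]
    simp only [pvAheadA, hsplitF, hsplitP, List.map_cons, List.map_append,
      List.cons_append, List.append_assoc, List.nil_append]
  have hkey : ∀ (L M : List Int) (x : Int) (i : Nat), i = L.length →
      (L ++ (x :: M)).eraseIdx i = L ++ M := by
    intro L M x i hi
    subst hi
    rw [List.eraseIdx_append_of_length_le (le_refl _)]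
    simp
  have hLlen : (((List.range' (t+1) (t-2)).map pvP).map f ++ [f (3*t-1), f (3*t)]).length = t := by
    simp; omega
  have hstep : pvStepR r (t+1) = (((List.range' (t+1) (t-2)).map pvP).map f
      ++ [f (3*t-1), f (3*t)]) ++ ((List.range' (3*t+2) (n-3*t-2)).map f ++ C) ++ [f (pvP t)] := by
    show (r.drop 1).eraseIdx (t+1-1) ++ r.take 1 = _
    rw [hr', show t+1-1 = t by omega]
    simp only [List.drop_succ_cons, List.drop_zero, List.take_succ_cons, List.take_zero]
    rw [hkey _ _ _ t hLlen.symm]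
  have hAnew : (pvAheadA n (t+1)).map f = (((List.range' (t+1) (t-2)).map pvP).map f
      ++ [f (3*t-1), f (3*t)]) ++ (List.range' (3*t+2) (n-3*t-2)).map f := by
    simp only [pvAheadA]
    have h1 : List.range' (t+1) ((t+1)-1) = List.range' (t+1) (t-2) ++ [2*t-1] ++ [2*t] := by
      rw [show (t+1) - 1 = (t-2) + 1 + 1 by omega, List.range'_concat, List.range'_concat,
          show t+1+1*(t-2+1) = 2*t by omega, show t+1+1*(t-2) = 2*t-1 by omega]
    rw [h1, show 3*(t+1)-1 = 3*t+2 by omega, show n-(3*t+2) = n-3*t-2 by omega]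
    have h2 : pvP (2*t-1) = 3*t-1 := by simp [pvP]; omega
    have h3 : pvP (2*t) = 3*t := by simp [pvP]; omega
    simp [h2, h3, List.append_assoc]
  refine ⟨C ++ [f (pvP t)], ?_, ?_, ?_⟩
  · rw [hstep, hAnew]
    simp [List.append_assoc]
  · have hl2 := congrArg List.length hstep
    have hl3 := congrArg List.length hr'
    rw [hlen] at hl3
    simp at hl2 hl3
    rw [hl2]
    omega
  · intro _
    simp

theorem pvStepB (f : Nat → Int) (n t : Nat) (ht0 : (n+1)/3 ≤ t) (hB : n ≤ 3*t+1)
    (hK : 2*t+2 ≤ n) (r : List Int)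
    (h : pvInv f (pvAheadB n ((n+1)/3) t) t n r) :
    pvInv f (pvAheadB n ((n+1)/3) (t+1)) (t+1) n (pvStepR r (t+1)) := by
  obtain ⟨C, hr, hlen, -⟩ := h
  have hA1 : n - t - (n+1)/3 = (n - (t+1) - (n+1)/3) + 1 := by omega
  have hsplit : List.range' t (n - t - (n+1)/3) =
      t :: List.range' (t+1) (n - (t+1) - (n+1)/3) := by
    rw [hA1, List.range'_succ]
  have hr' : r = f (pvP t) ::
      (((List.range' (t+1) (n - (t+1) - (n+1)/3)).map pvP).map f ++ C) := by
    rw [hr]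
    simp only [pvAheadB, hsplit, List.map_cons, List.cons_append]
  have hClen : C.length = (n+1)/3 := by
    have := congrArg List.length hr'
    rw [hlen] at this
    simp at this
    omega
  have hXlen : (((List.range' (t+1) (n - (t+1) - (n+1)/3)).map pvP).map f).length
      = n - (t+1) - (n+1)/3 := by simp
  have hidx : t - (n - (t+1) - (n+1)/3) < C.length := by omega
  have hstep : pvStepR r (t+1) = ((List.range' (t+1) (n - (t+1) - (n+1)/3)).map pvP).map f
      ++ (C.eraseIdx (t - (n - (t+1) - (n+1)/3)) ++ [f (pvP t)]) := by
    show (r.drop 1).eraseIdx (t+1-1) ++ r.take 1 = _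
    rw [hr', show t+1-1 = t by omega]
    simp only [List.drop_succ_cons, List.drop_zero, List.take_succ_cons, List.take_zero]
    rw [List.eraseIdx_append_of_length_le (by rw [hXlen]; omega), hXlen]
    simp [List.append_assoc]
  refine ⟨C.eraseIdx (t - (n - (t+1) - (n+1)/3)) ++ [f (pvP t)], ?_, ?_, ?_⟩
  · rw [hstep]; rfl
  · have := congrArg List.length hstep
    rw [this]
    simp [List.length_eraseIdx_of_lt hidx]
    omega
  · intro _
    simp

theorem pvTrans (n : Nat) (hn : 2 ≤ n) :
    pvAheadA n ((n+1)/3) = pvAheadB n ((n+1)/3) ((n+1)/3) := by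
  set q := (n+1)/3 with hq
  have hq3 : 3*q ≤ n+1 ∧ n ≤ 3*q+1 ∧ 1 ≤ q := by omega
  simp only [pvAheadA, pvAheadB]
  have hcase : n - (3*q-1) = 0 ∨ n - (3*q-1) = 1 ∨ n - (3*q-1) = 2 := by omega
  have hp1 : List.map pvP [q + 1*(q-1)] = [3*q-1] := by simp [pvP]; omega
  have hp2 : List.map pvP [q + 1*((q-1)+1)] = [3*q] := by simp [pvP]; omega
  rcases hcase with h|h|h
  · rw [h, show n - q - q = q - 1 by omega]
    simp
  · rw [h]
    symm
    rw [show n - q - q = (q-1)+1 by omega, List.range'_concat, List.map_append, hp1]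
    simp [List.range'_one]
  · rw [h]
    symm
    rw [show n - q - q = (q-1)+1+1 by omega, List.range'_concat, List.range'_concat,
        List.map_append, List.map_append, hp1, hp2]
    have : List.range' (3*q-1) 2 = [3*q-1, 3*q] := by
      rw [List.range'_succ, List.range'_one, show 3*q-1+1 = 3*q by omega]
    rw [this]
    simp

def pvF (arr : List Int) (q : Nat) : Int := arr.reverse.getD q 0
def pvIter (arr : List Int) (t : Nat) : List Int :=
  (List.range' 1 t).foldl pvStepR arr.reverse

theorem pvSelf_map (l : List Int) :
    l = (List.range' 0 l.length).map (fun q => l.getD q 0) := by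
  apply List.ext_getElem
  · simp
  · intro i h1 h2
    simp [List.getD_eq_getElem?_getD, List.getElem?_eq_getElem h1]

theorem pvIter_succ (arr : List Int) (t : Nat) :
    pvIter arr (t+1) = pvStepR (pvIter arr t) (t+1) := by
  unfold pvIter
  rw [List.range'_concat, List.foldl_append]
  simp [Nat.add_comm]

theorem pvIter_inv (arr : List Int) (t : Nat) (ht : t ≤ arr.length/2) :
    (t ≤ (arr.length+1)/3 →
      pvInv (pvF arr) (pvAheadA arr.length t) t arr.length (pvIter arr t)) ∧
    ((arr.length+1)/3 ≤ t →
      pvInv (pvF arr) (pvAheadB arr.length ((arr.length+1)/3) t) t arr.length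
        (pvIter arr t)) := by
  induction t with
  | zero =>
    have hbase : pvIter arr 0 = ((List.range' 0 arr.length).map (fun q => arr.reverse.getD q 0)) := by
      show arr.reverse = _
      have := pvSelf_map arr.reverse
      rwa [List.length_reverse] at this
    constructor
    · intro _
      refine ⟨[], ?_, by simp [pvIter], fun h => absurd h (by omega)⟩
      rw [hbase]
      simp [pvAheadA, pvF]
    · intro h0
      have hn1 : arr.length ≤ 1 := by omega
      refine ⟨[], ?_, by simp [pvIter], fun h => absurd h (by omega)⟩
      rw [hbase]
      interval_cases h : arr.length
      · simp [pvAheadB]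
      · simp [pvAheadB, pvP, pvF, h]
  | succ t ih =>
    have ht' : t ≤ arr.length/2 := by omega
    obtain ⟨ih1, ih2⟩ := ih ht'
    rw [pvIter_succ]
    by_cases hlt : t+1 ≤ (arr.length+1)/3
    · have hInv1 := ih1 (by omega)
      have hn2 : 2 ≤ arr.length := by omega
      have hInvA : pvInv (pvF arr) (pvAheadA arr.length (t+1)) (t+1) arr.length
          (pvStepR (pvIter arr t) (t+1)) := by
        match t, hInv1 with
        | 0, hInv1 => exact pvStep0 _ _ (by omega) _ hInv1
        | 1, hInv1 => exact pvStep1 _ _ (by omega) _ hInv1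
        | (m+2), hInv1 => exact pvStepA _ _ _ (by omega) (by omega) _ hInv1
      refine ⟨fun _ => hInvA, fun hge => ?_⟩
      have heq : t+1 = (arr.length+1)/3 := le_antisymm hlt hge
      have htr := pvTrans arr.length hn2
      rw [← heq] at htr
      rw [← heq]
      rwa [htr] at hInvA
    · have hq_le : (arr.length+1)/3 ≤ t := by omega
      have hInv2 := ih2 hq_le
      have hstep := pvStepB (pvF arr) arr.length t hq_le (by omega) (by omega) _ hInv2
      exact ⟨fun h => absurd h (by omega), fun _ => hstep⟩

theorem pvEraseIdx_reverse (l : List Int) (i : Nat) (hi : i < l.length) :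
    l.reverse.eraseIdx i = (l.eraseIdx (l.length - 1 - i)).reverse := by
  rw [List.eraseIdx_eq_take_drop_succ, List.eraseIdx_eq_take_drop_succ,
      List.take_reverse, List.drop_reverse, List.reverse_append]
  have h2 : l.length - 1 - i + 1 = l.length - i := by omega
  have h3 : l.length - (i + 1) = l.length - 1 - i := by omega
  rw [h2, h3]

theorem pvMirror_step (r : List Int) (j : Nat) (hj : 1 ≤ j) (hlen : j + 1 ≤ r.length) :
    (let a1 := (r.reverse).getLastD 0 :: (r.reverse).dropLast
     a1.eraseIdx ((a1.length : Int) - (j : Int)).toNat) = (pvStepR r j).reverse := by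
  obtain ⟨x, tl, rfl⟩ : ∃ x tl, r = x :: tl := by
    cases r with
    | nil => simp at hlen
    | cons a b => exact ⟨a, b, rfl⟩
  have hlen' : j ≤ tl.length := by simpa using hlen
  show (((x :: tl).reverse.getLastD 0 :: (x :: tl).reverse.dropLast).eraseIdx _) = _
  rw [List.dropLast_reverse]
  have hgl : (x :: tl).reverse.getLastD 0 = x := by
    rw [List.getLastD_eq_getLast?, List.getLast?_reverse]; rfl
  rw [hgl]
  have hlen2 : (x :: (x :: tl).tail.reverse).length = tl.length + 1 := by simp
  rw [hlen2]
  have hidx : ((((tl.length + 1) : Nat) : Int) - (j : Int)).toNat = (tl.length - j) + 1 := by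
    omega
  rw [hidx, List.eraseIdx_cons_succ]
  show x :: ((tl.reverse).eraseIdx (tl.length - j)) = _
  rw [pvEraseIdx_reverse tl (tl.length - j) (by omega)]
  have : tl.length - 1 - (tl.length - j) = j - 1 := by omega
  rw [this]
  show _ = ((((x :: tl).drop 1).eraseIdx (j-1)) ++ (x :: tl).take 1).reverse
  rw [List.reverse_append]
  rfl

theorem pvIter_length (arr : List Int) (t : Nat) (ht : t ≤ arr.length/2) :
    (pvIter arr t).length = arr.length - t := by
  obtain ⟨h1, h2⟩ := pvIter_inv arr t ht
  by_cases hq : t ≤ (arr.length+1)/3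
  · obtain ⟨C, -, hlen, -⟩ := h1 hq
    exact hlen
  · obtain ⟨C, -, hlen, -⟩ := h2 (by omega)
    exact hlen

theorem pvPyRange_eq (K : Nat) :
    PySem.List.pyRange 1 ((K : Int) + 1) 1 = (List.range' 1 K).map Int.ofNat := by
  rw [PySem.List.pyRange_one, List.range'_eq_map_range, List.map_map]
  rw [show ((K:Int)+1-1).toNat = K by omega]
  refine List.map_congr_left ?_
  intro a _
  show (1:Int) + (a:Int) = Int.ofNat (1 + a)
  simp [Int.ofNat_eq_natCast]

theorem pvMirror (arr : List Int) (t : Nat) (ht : t ≤ arr.length/2) :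
    ((List.range' 1 t).map (Int.ofNat)).foldl
      (fun a k =>
        let a1 := a.getLastD 0 :: a.dropLast
        let index : Int := (a1.length : Int) - k
        a1.eraseIdx index.toNat) arr = (pvIter arr t).reverse := by
  induction t with
  | zero => simp [pvIter]
  | succ t ih =>
    have ht' : t ≤ arr.length/2 := by omega
    rw [List.range'_concat, List.map_append, List.foldl_append, ih ht', pvIter_succ]
    show (let a1 := ((pvIter arr t).reverse).getLastD 0 :: ((pvIter arr t).reverse).dropLast
          let index : Int := (a1.length : Int) - (Int.ofNat (1+1*t))
          a1.eraseIdx index.toNat) = _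
    have hcast : (Int.ofNat (1+1*t)) = ((t+1 : Nat) : Int) := by
      simp [Int.ofNat_eq_natCast]
      omega
    rw [hcast]
    have hlen : (t+1) + 1 ≤ (pvIter arr t).length := by
      rw [pvIter_length arr t ht']
      omega
    exact pvMirror_step (pvIter arr t) (t+1) (by omega) hlen

theorem pvA_closed (arr : List Int) (hn : 2 ≤ arr.length) :
    rotateDelete arr = pvF arr (pvP (arr.length/2 - 1)) := by
  have hK : arr.length/2 ≤ arr.length/2 := le_refl _
  have hfd : PySem.Int.floordiv (arr.length : Int) 2 = ((arr.length/2 : Nat) : Int) := by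
    exact_mod_cast PySem.Int.floordiv_natCast arr.length 2
  show (PySem.List.pyGet? ((PySem.List.pyRange 1 (PySem.Int.floordiv (arr.length : Int) 2 + 1) 1).foldl _ arr) 0).getD 0 = _
  rw [hfd, pvPyRange_eq, pvMirror arr (arr.length/2) hK]
  rw [PySem.List.pyGet?_zero]
  rw [← List.head?_eq_getElem?, List.head?_reverse]
  -- use the invariant at t = n/2
  obtain ⟨-, h2⟩ := pvIter_inv arr (arr.length/2) hK
  obtain ⟨C, hr, hlen, hlast⟩ := h2 (by omega)
  have hlast' := hlast (by omega)
  have hCne : C ≠ [] := by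
    intro e
    rw [e] at hlast'
    simp at hlast'
  rw [hr, List.getLast?_append_of_ne_nil _ hCne, hlast']
  rfl

theorem pvB_closed (arr : List Int) (hn : 2 ≤ arr.length) :
    rotateDelete_alt arr = pvF arr (pvP (arr.length/2 - 1)) := by
  have hfd : PySem.Int.floordiv (arr.length : Int) 2 = ((arr.length/2 : Nat) : Int) := by
    exact_mod_cast PySem.Int.floordiv_natCast arr.length 2
  have hne : (((arr.length : Int)) == 1) = false := by
    simp
    omega
  show (if ((arr.length : Int)) == 1 then _ else _) = _
  rw [hne]
  simp only [Bool.false_eq_true, if_false]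
  rw [hfd]
  have ht : (3 * (((arr.length/2 : Nat) : Int) - 1) + 1) = (((3*(arr.length/2 - 1) + 1 : Nat)) : Int) := by
    have : 1 ≤ arr.length/2 := by omega
    omega
  rw [ht]
  have hfd2 : PySem.Int.floordiv ((3*(arr.length/2 - 1) + 1 : Nat) : Int) 2
      = ((pvP (arr.length/2 - 1) : Nat) : Int) := by
    exact_mod_cast PySem.Int.floordiv_natCast (3*(arr.length/2 - 1) + 1) 2
  rw [hfd2]
  have hple : pvP (arr.length/2 - 1) + 1 ≤ arr.length := by
    have h1 : arr.length/2 - 1 ≤ arr.length/2 := by omega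
    simp [pvP]
    omega
  have hidx : ((arr.length : Int) - 1 - ((pvP (arr.length/2 - 1) : Nat) : Int))
      = (((arr.length - 1 - pvP (arr.length/2 - 1) : Nat)) : Int) := by
    omega
  rw [hidx]
  rw [PySem.List.pyGet?_natCast]
  have hlt : arr.length - 1 - pvP (arr.length/2 - 1) < arr.length := by omega
  rw [List.getElem?_eq_getElem hlt]
  show arr[arr.length - 1 - pvP (arr.length/2 - 1)] = _
  unfold pvF
  have hlt2 : pvP (arr.length/2 - 1) < arr.reverse.length := by simp; omega
  rw [List.getD_eq_getElem _ _ hlt2, List.getElem_reverse]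

-- ===== VERDICT (by name: the statement is the Claim_ definition above) =====
theorem rotateDelete_spec : Claim_equal_rotateDelete := by
  intro arr _ hpre
  unfold Spec_rotateDelete
  match arr, hpre with
  | [x], _ => rfl
  | (a :: b :: l), _ =>
    have h2 : 2 ≤ (a :: b :: l).length := by simp
    rw [pvA_closed _ h2]
    exact (pvB_closed _ h2).symm
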